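-- pv_equiv track=rewrite | github.com/The-NOVA-System/nova_app | windows/runner/third_party/firebase_cpp_sdk/binary_to_array.py | source
-- ===== SOURCE A (Python) =====
-- WIDTH = 12
--
-- def source(namespaces, array_name, array_size_name, fileid, filename,
--            input_bytes):
--   """Return a C/C++ source file for the given array.
--
--   Args:
--     namespaces: List of namespaces, outer to inner.
--     array_name: Name of the array.
--     array_size_name: Name of the array size constant.
--     fileid: Name of the identifier containing the filename.
--     filename: The original data filename itself.
--     input_bytes: Binary data to put into the array.
--
--   Returns:
--     A string containing the C/C++ source file.
--   """
--   data = []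
--   data.extend([
--       "// Copyright 2016 Google Inc. All Rights Reserved.",
--       "",
--       "#include <stdlib.h>",
--       ""
--   ])
--   if namespaces:
--     data.extend([
--         "namespace %s {" % ns for ns in namespaces
--     ])
--   else:
--     data.extend([
--         "#if defined(__cplusplus)",
--         "extern \"C\" {",
--         "#endif  // defined(__cplusplus)"])
--
--   data.extend([
--       "",
--       "extern const size_t %s;" % array_size_name,
--       "extern const char %s[];" % fileid,
--       "extern const unsigned char %s[];" % array_name, "",
--       "const unsigned char %s[] = {" % array_name
--   ])
--   length = len(input_bytes)
--   line = ""
--   for idx in range(0, length):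
--     if idx % WIDTH == 0:
--       line += "  "
--     else:
--       line += " "
--     line += "0x%02x," % input_bytes[idx]
--     if idx % WIDTH == WIDTH - 1:
--       data.append(line)
--       line = ""
--   data.append(line)
--   data.append("  0x00  // Extra \\0 to make it a C string")
--
--   data.extend([
--       "};",
--       "",
--       "const size_t %s =" % array_size_name,
--       "  sizeof(%s) - 1;" % array_name,
--       "",
--       "const char %s[] =" % fileid,
--       "  \"%s\";" % filename,
--       "",
--   ])
--
--   if namespaces:
--     data.extend([
--         "}  // namespace %s" % ns for ns in namespaces
--     ][::-1])  # close namespaces in reverse order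
--   else:
--     data.extend([
--         "#if defined(__cplusplus)",
--         "}  // extern \"C\"",
--         "#endif  // defined(__cplusplus)"
--     ])
--   data.extend([
--       ""
--   ])
--   return data
-- ===== SOURCE B (Python) =====
-- WIDTH = 12
--
--
-- def source(namespaces, array_name, array_size_name, fileid, filename,
--            input_bytes):
--   """Return a C/C++ source file for the given array (chunked formatting)."""
--   if namespaces:
--     opening = ["namespace %s {" % ns for ns in namespaces]
--     closing = ["}  // namespace %s" % ns for ns in reversed(namespaces)]
--   else:
--     opening = ["#if defined(__cplusplus)",
--                "extern \"C\" {",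
--                "#endif  // defined(__cplusplus)"]
--     closing = ["#if defined(__cplusplus)",
--                "}  // extern \"C\"",
--                "#endif  // defined(__cplusplus)"]
--
--   chunks = []
--   i = 0
--   while i < len(input_bytes):
--     chunks.append(input_bytes[i:i + WIDTH])
--     i += WIDTH
--   body = ["  " + " ".join("0x%02x," % b for b in chunk) for chunk in chunks]
--   if len(input_bytes) % WIDTH == 0:
--     body.append("")
--
--   return (
--       ["// Copyright 2016 Google Inc. All Rights Reserved.",
--        "",
--        "#include <stdlib.h>",
--        ""]
--       + opening
--       + ["",
--          "extern const size_t %s;" % array_size_name,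
--          "extern const char %s[];" % fileid,
--          "extern const unsigned char %s[];" % array_name,
--          "",
--          "const unsigned char %s[] = {" % array_name]
--       + body
--       + ["  0x00  // Extra \\0 to make it a C string",
--          "};",
--          "",
--          "const size_t %s =" % array_size_name,
--          "  sizeof(%s) - 1;" % array_name,
--          "",
--          "const char %s[] =" % fileid,
--          "  \"%s\";" % filename,
--          ""]
--       + closing
--       + [""])
-- ===== Notes on version B (the rewrite author's own statement) =====
-- stated objective: simpler
-- what changed: Replaces A's per-byte index/accumulator loop (line string built byte by byte, flushed on idx % WIDTH == WIDTH-1, with leftover-line bookkeeping) by slicing the bytes into WIDTH-sized chunks and emitting each line as ' ' + ' '.join(...), with the trailing blank line added exactly when len(input_bytes) % WIDTH == 0; the header/footer lists are assembled as one concatenation instead of successive extends.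
import Mathlib
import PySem

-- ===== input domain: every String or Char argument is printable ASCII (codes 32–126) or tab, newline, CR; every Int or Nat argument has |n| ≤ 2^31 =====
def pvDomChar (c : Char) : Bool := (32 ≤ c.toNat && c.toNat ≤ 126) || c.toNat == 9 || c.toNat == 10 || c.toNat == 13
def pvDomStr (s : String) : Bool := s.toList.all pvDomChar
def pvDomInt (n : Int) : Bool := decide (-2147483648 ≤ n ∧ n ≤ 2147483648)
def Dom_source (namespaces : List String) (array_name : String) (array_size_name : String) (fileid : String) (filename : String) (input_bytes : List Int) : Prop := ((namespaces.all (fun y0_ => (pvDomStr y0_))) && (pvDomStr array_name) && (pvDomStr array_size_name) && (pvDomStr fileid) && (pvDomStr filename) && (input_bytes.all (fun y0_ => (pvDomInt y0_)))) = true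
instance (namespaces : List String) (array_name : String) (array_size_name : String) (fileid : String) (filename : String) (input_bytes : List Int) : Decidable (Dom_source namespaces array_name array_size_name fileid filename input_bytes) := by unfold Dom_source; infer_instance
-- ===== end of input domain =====

-- B replaces A's index/accumulator byte loop by slicing the bytes into WIDTH-sized
-- chunks up front and joining each chunk; objective: simpler (same cost).

-- ===== PORT A =====

-- "0x%02x," % b — Python-exact also for negative b ('%02x' % -5 = '-5': sign plus
-- lowercase hex digits, already at least 2 characters wide, so no zero padding).
def fmtByte (b : Int) : String :=
  if b < 0 then "0x-" ++ String.ofList (Nat.toDigits 16 (-b).toNat) ++ ","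
  else "0x" ++ (if b < 16 then "0" else "") ++ String.ofList (Nat.toDigits 16 b.toNat) ++ ","

-- A's byte loop: `for idx in range(0, length): …` with the accumulator `line`,
-- including the final `data.append(line)` right after the loop (the base case).
def srcLoop (idx : Nat) (line : String) : List Int → List String
  | [] => [line]
  | b :: rest =>
    let line' := line ++ (if idx % 12 = 0 then "  " else " ") ++ fmtByte b
    if idx % 12 = 11 then line' :: srcLoop (idx + 1) "" rest
    else srcLoop (idx + 1) line' rest

def source (namespaces : List String) (array_name : String) (array_size_name : String) (fileid : String) (filename : String) (input_bytes : List Int) : List String :=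
  let data : List String := ["// Copyright 2016 Google Inc. All Rights Reserved.", "", "#include <stdlib.h>", ""]
  let data := data ++ (if namespaces ≠ [] then
      namespaces.map (fun ns => "namespace " ++ ns ++ " {")
    else
      ["#if defined(__cplusplus)", "extern \"C\" {", "#endif  // defined(__cplusplus)"])
  let data := data ++ ["",
      "extern const size_t " ++ array_size_name ++ ";",
      "extern const char " ++ fileid ++ "[];",
      "extern const unsigned char " ++ array_name ++ "[];", "",
      "const unsigned char " ++ array_name ++ "[] = {"]
  let data := data ++ srcLoop 0 "" input_bytes   -- the loop plus data.append(line)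
  let data := data ++ ["  0x00  // Extra \\0 to make it a C string"]
  let data := data ++ ["};", "",
      "const size_t " ++ array_size_name ++ " =",
      "  sizeof(" ++ array_name ++ ") - 1;", "",
      "const char " ++ fileid ++ "[] =",
      "  \"" ++ filename ++ "\";", ""]
  let data := data ++ (if namespaces ≠ [] then
      (namespaces.map (fun ns => "}  // namespace " ++ ns)).reverse   -- [::-1]
    else
      ["#if defined(__cplusplus)", "}  // extern \"C\"", "#endif  // defined(__cplusplus)"])
  data ++ [""]

-- ===== PORT B =====

-- B's while loop: `i = 0; while i < len(input_bytes): chunks.append(input_bytes[i:i+WIDTH]); i += WIDTH`.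
def chunksFrom (bs : List Int) (i : Nat) : List (List Int) :=
  if _h : i < bs.length then
    PySem.List.slice bs (some (i : Int)) (some ((i : Int) + 12)) :: chunksFrom bs (i + 12)
  else []
termination_by bs.length - i
decreasing_by omega

-- '  ' + ' '.join('0x%02x,' % b for b in chunk)
def lineOf (chunk : List Int) : String := "  " ++ PySem.Str.join " " (chunk.map fmtByte)

def source_alt (namespaces : List String) (array_name : String) (array_size_name : String) (fileid : String) (filename : String) (input_bytes : List Int) : List String :=
  let opening := if namespaces ≠ [] then
      namespaces.map (fun ns => "namespace " ++ ns ++ " {")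
    else
      ["#if defined(__cplusplus)", "extern \"C\" {", "#endif  // defined(__cplusplus)"]
  let closing := if namespaces ≠ [] then
      namespaces.reverse.map (fun ns => "}  // namespace " ++ ns)   -- reversed(namespaces)
    else
      ["#if defined(__cplusplus)", "}  // extern \"C\"", "#endif  // defined(__cplusplus)"]
  let body := (chunksFrom input_bytes 0).map lineOf
      ++ (if input_bytes.length % 12 = 0 then [""] else [])
  ["// Copyright 2016 Google Inc. All Rights Reserved.", "", "#include <stdlib.h>", ""]
  ++ opening
  ++ ["",
      "extern const size_t " ++ array_size_name ++ ";",
      "extern const char " ++ fileid ++ "[];",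
      "extern const unsigned char " ++ array_name ++ "[];", "",
      "const unsigned char " ++ array_name ++ "[] = {"]
  ++ body
  ++ ["  0x00  // Extra \\0 to make it a C string", "};", "",
      "const size_t " ++ array_size_name ++ " =",
      "  sizeof(" ++ array_name ++ ") - 1;", "",
      "const char " ++ fileid ++ "[] =",
      "  \"" ++ filename ++ "\";", ""]
  ++ closing
  ++ [""]

-- ===== PRECONDITION & SPEC =====
def Spec_source (namespaces : List String) (array_name : String) (array_size_name : String) (fileid : String) (filename : String) (input_bytes : List Int) (out : List String) : Prop := out = source_alt namespaces array_name array_size_name fileid filename input_bytes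
instance (namespaces : List String) (array_name : String) (array_size_name : String) (fileid : String) (filename : String) (input_bytes : List Int) (out : List String) : Decidable (Spec_source namespaces array_name array_size_name fileid filename input_bytes out) := by unfold Spec_source; infer_instance

-- ===== CLAIM (what is proved, stated in full; the proofs are below) =====
def Claim_equal_source : Prop := ∀ (namespaces : List String) (array_name : String) (array_size_name : String) (fileid : String) (filename : String) (input_bytes : List Int), Dom_source namespaces array_name array_size_name fileid filename input_bytes → Spec_source namespaces array_name array_size_name fileid filename input_bytes (source namespaces array_name array_size_name fileid filename input_bytes)

-- ===== LEMMAS AND PROOFS =====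

-- Proof-side view of B's chunking: peel chunks of 12 off the front.
def chunksOf12 (bs : List Int) : List (List Int) :=
  if _h : bs = [] then [] else bs.take 12 :: chunksOf12 (bs.drop 12)
termination_by bs.length
decreasing_by
  have hpos : 0 < bs.length := List.length_pos_of_ne_nil _h
  simp only [List.length_drop]; omega

-- B's index-stepping while loop computes exactly that peeling.
theorem chunksFrom_eq_chunksOf12 : ∀ (n : Nat) (bs : List Int) (i : Nat), bs.length - i = n →
    chunksFrom bs i = chunksOf12 (bs.drop i) := by
  intro n
  induction n using Nat.strong_induction_on with
  | _ n IH =>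
    intro bs i hn
    rw [chunksFrom]
    by_cases h : i < bs.length
    · rw [dif_pos h]
      rw [chunksOf12, dif_neg (by
        intro hnil
        have := List.drop_eq_nil_iff.mp hnil
        omega)]
      congr 1
      · have hc : ((i : Int) + 12) = (((i + 12 : Nat)) : Int) := by push_cast; ring
        rw [hc, PySem.List.slice_natCast]
        congr 1
        omega
      · rw [IH (bs.length - (i + 12)) (by omega) bs (i + 12) rfl]
        rw [List.drop_drop]
    · rw [dif_neg h]
      rw [List.drop_eq_nil_of_le (by omega), chunksOf12, dif_pos rfl]

-- ' '.join prefixed by `pre` is the left fold A's accumulator performs.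
theorem join_space_foldl (l : List String) : ∀ (x pre : String),
    pre ++ PySem.Str.join " " (x :: l) = l.foldl (fun a y => a ++ " " ++ y) (pre ++ x) := by
  induction l with
  | nil =>
    intro x pre
    apply String.toList_inj.mp
    simp [PySem.Str.toList_join, PySem.Chars.join_singleton, String.toList_append]
  | cons y l' ih =>
    intro x pre
    have h1 : pre ++ PySem.Str.join " " (x :: y :: l')
        = (pre ++ x ++ " ") ++ PySem.Str.join " " (y :: l') := by
      apply String.toList_inj.mp
      simp [PySem.Str.toList_join, PySem.Chars.join_cons_cons, String.toList_append]
    have h2 : (pre ++ x) ++ " " ++ y = (pre ++ x ++ " ") ++ y := rfl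
    rw [h1, ih y (pre ++ x ++ " ")]
    simp [List.foldl_cons]

-- A's loop inside a chunk, ending exactly at a flush (idx % 12 = 11 on the last byte).
theorem srcLoop_flush (c : List Int) : ∀ (rest : List Int) (idx : Nat) (line : String),
    0 < idx % 12 → idx % 12 + c.length = 12 →
    srcLoop idx line (c ++ rest)
      = (c.foldl (fun a b => a ++ " " ++ fmtByte b) line) :: srcLoop (idx + c.length) "" rest := by
  induction c with
  | nil =>
    intro rest idx line h1 h2
    exfalso
    simp only [List.length_nil, Nat.add_zero] at h2
    omega
  | cons b c' ih =>
    intro rest idx line h1 h2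
    simp only [List.length_cons] at h2
    have hne0 : ¬ (idx % 12 = 0) := by omega
    cases c' with
    | nil =>
      simp only [List.length_nil] at h2
      have h11 : idx % 12 = 11 := by omega
      simp [srcLoop, h11]
    | cons b2 c'' =>
      have hne11 : ¬ (idx % 12 = 11) := by
        simp only [List.length_cons] at h2
        omega
      show srcLoop idx line (b :: ((b2 :: c'') ++ rest)) = _
      simp only [srcLoop]
      rw [if_neg hne0, if_neg hne11]
      rw [ih rest (idx + 1) (line ++ " " ++ fmtByte b) (by omega)
            (by simp only [List.length_cons] at h2 ⊢; omega)]
      have hidx : idx + 1 + (b2 :: c'').length = idx + (b :: b2 :: c'').length := by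
        simp only [List.length_cons]; omega
      rw [hidx]
      rfl

-- A's loop on a final partial chunk (never flushes; the trailing append returns the line).
theorem srcLoop_short (c : List Int) : ∀ (idx : Nat) (line : String),
    0 < idx % 12 → idx % 12 + c.length < 12 →
    srcLoop idx line c = [c.foldl (fun a b => a ++ " " ++ fmtByte b) line] := by
  induction c with
  | nil => intro idx line _ _; simp [srcLoop]
  | cons b c' ih =>
    intro idx line h1 h2
    simp only [List.length_cons] at h2
    have hne0 : ¬ (idx % 12 = 0) := by omega
    have hne11 : ¬ (idx % 12 = 11) := by omega
    simp only [srcLoop]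
    rw [if_neg hne0, if_neg hne11]
    rw [ih (idx + 1) (line ++ " " ++ fmtByte b) (by omega) (by omega)]
    rfl

-- One chunk line, seen as A's string accumulator.
theorem lineOf_cons (b : Int) (l : List Int) :
    lineOf (b :: l)
      = l.foldl (fun a y => a ++ " " ++ fmtByte y) ("" ++ "  " ++ fmtByte b) := by
  have h0 : ("" : String) ++ "  " ++ fmtByte b = "  " ++ fmtByte b := by
    apply String.toList_inj.mp
    simp [String.toList_append]
  rw [lineOf, List.map_cons, join_space_foldl, List.foldl_map, h0]

-- The whole byte loop equals B's chunked lines (plus the blank flush line when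
-- the length is a multiple of 12, including the empty input).
theorem srcLoop_eq_chunks : ∀ (n : Nat) (bs : List Int), bs.length = n → ∀ (idx : Nat), idx % 12 = 0 →
    srcLoop idx "" bs
      = (chunksOf12 bs).map lineOf ++ (if bs.length % 12 = 0 then [""] else []) := by
  intro n
  induction n using Nat.strong_induction_on with
  | _ n IH =>
    intro bs hlen idx hidx
    subst hlen
    cases bs with
    | nil => simp [srcLoop, chunksOf12]
    | cons b rest0 =>
      simp only [srcLoop]
      rw [if_pos hidx]
      have hne11 : ¬ (idx % 12 = 11) := by omega
      rw [if_neg hne11]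
      by_cases hlt : (b :: rest0).length < 12
      · -- single, partial chunk
        have hr : rest0.length ≤ 10 := by simp only [List.length_cons] at hlt; omega
        rw [srcLoop_short rest0 (idx + 1) _ (by omega) (by omega)]
        have hch : chunksOf12 (b :: rest0) = [b :: rest0] := by
          have e1 : List.take 12 (b :: rest0) = b :: rest0 :=
            List.take_of_length_le (by simp only [List.length_cons]; omega)
          have e2 : List.drop 12 (b :: rest0) = [] :=
            List.drop_eq_nil_of_le (by simp only [List.length_cons]; omega)
          rw [chunksOf12, dif_neg (by simp : ¬ (b :: rest0 = [])), e1, e2,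
              chunksOf12, dif_pos rfl]
        have hmod : ¬ ((b :: rest0).length % 12 = 0) := by
          simp only [List.length_cons]; omega
        rw [hch, if_neg hmod]
        simp only [List.map_cons, List.map_nil, List.append_nil]
        rw [lineOf_cons]
      · -- a full chunk, then recurse
        have hr11 : 11 ≤ rest0.length := by simp only [List.length_cons] at hlt; omega
        have hsplit : rest0 = rest0.take 11 ++ rest0.drop 11 := (List.take_append_drop 11 rest0).symm
        conv_lhs => rw [hsplit]
        rw [srcLoop_flush (rest0.take 11) (rest0.drop 11) (idx + 1) _ (by omega)
              (by rw [List.length_take]; omega)]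
        rw [List.length_take, min_eq_left hr11]
        rw [IH ((b :: rest0).length - 12)
              (by simp only [List.length_cons]; omega)
              (rest0.drop 11)
              (by simp only [List.length_drop, List.length_cons]; omega)
              (idx + 1 + 11) (by omega)]
        have hch : chunksOf12 (b :: rest0)
            = (b :: rest0.take 11) :: chunksOf12 (rest0.drop 11) := by
          rw [chunksOf12, dif_neg (by simp : ¬ (b :: rest0 = []))]
          simp [List.take_succ_cons, List.drop_succ_cons]
        have hmods : (rest0.drop 11).length % 12 = (b :: rest0).length % 12 := by
          simp only [List.length_drop, List.length_cons]; omega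
        rw [hch, hmods]
        simp only [List.map_cons, List.cons_append]
        rw [lineOf_cons]

-- ===== VERDICT (by name: the statement is the Claim_ definition above) =====
theorem source_spec : Claim_equal_source := by
  intro namespaces array_name array_size_name fileid filename input_bytes _
  show _ = _
  rw [source, source_alt,
      srcLoop_eq_chunks input_bytes.length input_bytes rfl 0 (by omega),
      chunksFrom_eq_chunksOf12 input_bytes.length input_bytes 0 (by omega),
      List.drop_zero, List.map_reverse]
  simp only [List.append_assoc, List.cons_append, List.nil_append]
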